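-- pv_equiv track=rewrite | github.com/fdsig/vans | get_vans_cargurus.py | _generate_full_postcodes
-- ===== SOURCE A (Python) =====
-- from typing import List, Dict, Any, Sequence, Tuple, Optional, Set
--
-- def _generate_full_postcodes(area_codes: List[str], limit: int) -> List[str]:
--     """Generate full postcodes from area codes"""
--     postcodes = []
--
--     common_endings = [
--         "1AA", "1AB", "1AD", "1AE", "1AF", "1AG", "1AH", "1AJ", "1AL",
--         "2AA", "2AB", "2AD", "2AE", "2AF", "3AA", "3AB", "3AD", "4AA", "5AA",
--         "6AA", "7AA", "8AA", "9AA", "0AA"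
--     ]
--
--     for area_code in area_codes:
--         for ending in common_endings:
--             if len(postcodes) >= limit:
--                 break
--             postcode = f"{area_code} {ending}"
--             postcodes.append(postcode)
--         if len(postcodes) >= limit:
--             break
--
--     return postcodes
-- ===== SOURCE B (Python) =====
-- def _generate_full_postcodes(area_codes, limit):
--     """Generate full postcodes from area codes"""
--     common_endings = [
--         "1AA", "1AB", "1AD", "1AE", "1AF", "1AG", "1AH", "1AJ", "1AL",
--         "2AA", "2AB", "2AD", "2AE", "2AF", "3AA", "3AB", "3AD", "4AA", "5AA",
--         "6AA", "7AA", "8AA", "9AA", "0AA"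
--     ]
--     n = len(common_endings)
--     total = min(limit, len(area_codes) * n)
--     return [f"{area_codes[i // n]} {common_endings[i % n]}" for i in range(total)]
-- ===== Notes on version B (the rewrite author's own statement) =====
-- stated objective: simpler
-- what changed: Replaced the nested loops with double break checks by computing the output count total = min(limit, len(area_codes)*n) up front and producing the list in one flat pass over range(total), recovering area and ending by divmod index arithmetic.
import Mathlib
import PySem

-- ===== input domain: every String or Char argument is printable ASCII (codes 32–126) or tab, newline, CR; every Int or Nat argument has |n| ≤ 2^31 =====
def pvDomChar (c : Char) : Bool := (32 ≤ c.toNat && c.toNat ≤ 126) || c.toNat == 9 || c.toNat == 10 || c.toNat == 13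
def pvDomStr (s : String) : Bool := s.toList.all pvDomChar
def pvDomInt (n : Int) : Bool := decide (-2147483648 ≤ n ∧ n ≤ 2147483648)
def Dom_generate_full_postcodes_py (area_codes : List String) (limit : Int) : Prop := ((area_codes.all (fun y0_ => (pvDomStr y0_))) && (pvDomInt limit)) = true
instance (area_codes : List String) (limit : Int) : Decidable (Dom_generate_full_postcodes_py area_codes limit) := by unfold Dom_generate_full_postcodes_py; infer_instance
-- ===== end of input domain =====

-- B replaces A's nested loops with double break checks by one flat pass over
-- range(min(limit, len(area_codes)*n)) using divmod index arithmetic (objective: simpler).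

def pvEndings : List String :=
  ["1AA", "1AB", "1AD", "1AE", "1AF", "1AG", "1AH", "1AJ", "1AL",
   "2AA", "2AB", "2AD", "2AE", "2AF", "3AA", "3AB", "3AD", "4AA", "5AA",
   "6AA", "7AA", "8AA", "9AA", "0AA"]

-- ===== PORT A =====
-- the inner `for ending in common_endings` loop with its break
def pvInnerA (limit : Int) (area : String) (acc : List String) : List String → List String
  | [] => acc
  | e :: rest =>
    if (acc.length : Int) ≥ limit then acc
    else pvInnerA limit area (acc ++ [area ++ " " ++ e]) rest

-- the outer `for area_code in area_codes` loop with its break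
def pvOuterA (limit : Int) (acc : List String) : List String → List String
  | [] => acc
  | a :: rest =>
    let acc' := pvInnerA limit a acc pvEndings
    if (acc'.length : Int) ≥ limit then acc' else pvOuterA limit acc' rest

def generate_full_postcodes_py (area_codes : List String) (limit : Int) : List String :=
  pvOuterA limit [] area_codes

-- ===== PORT B =====
-- [f"{area_codes[i // n]} {common_endings[i % n]}" for i in range(total)];
-- the indices are always in range, so the pyGetD default "" is never used.
def generate_full_postcodes_py_alt (area_codes : List String) (limit : Int) : List String :=
  let n : Int := pvEndings.length
  let total : Int := min limit ((area_codes.length : Int) * n)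
  (PySem.List.pyRange 0 total 1).map (fun i =>
    PySem.List.pyGetD area_codes (PySem.Int.floordiv i n) "" ++ " " ++
    PySem.List.pyGetD pvEndings (PySem.Int.mod i n) "")

-- ===== PRECONDITION & SPEC =====
def Spec_generate_full_postcodes_py (area_codes : List String) (limit : Int) (out : List String) : Prop := out = generate_full_postcodes_py_alt area_codes limit
instance (area_codes : List String) (limit : Int) (out : List String) : Decidable (Spec_generate_full_postcodes_py area_codes limit out) := by unfold Spec_generate_full_postcodes_py; infer_instance

-- ===== CLAIM (what is proved, stated in full; the proofs are below) =====
def Claim_equal_generate_full_postcodes_py : Prop := ∀ (area_codes : List String) (limit : Int), Dom_generate_full_postcodes_py area_codes limit → Spec_generate_full_postcodes_py area_codes limit (generate_full_postcodes_py area_codes limit)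

-- ===== LEMMAS AND PROOFS =====

-- the full (untruncated) product list, the common yardstick for both ports
def pvFlat (area_codes : List String) : List String :=
  area_codes.flatMap (fun a => pvEndings.map (fun e => a ++ " " ++ e))

theorem pvFlat_length (as : List String) : (pvFlat as).length = as.length * 24 := by
  induction as with
  | nil => rfl
  | cons a rest ih =>
    have h24 : pvEndings.length = 24 := rfl
    simp [pvFlat, h24] at ih ⊢
    omega

theorem pvInnerA_eq (limit : Int) (area : String) :
    ∀ (es : List String) (acc : List String),
      pvInnerA limit area acc es
        = acc ++ (es.map (fun e => area ++ " " ++ e)).take ((limit - acc.length).toNat) := by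
  intro es
  induction es with
  | nil => intro acc; simp [pvInnerA]
  | cons e rest ih =>
    intro acc
    by_cases h : (acc.length : Int) ≥ limit
    · have : (limit - acc.length).toNat = 0 := by omega
      simp [pvInnerA, h, this]
    · have hk : (limit - acc.length).toNat = (limit - ((acc.length : Int) + 1)).toNat + 1 := by omega
      simp only [pvInnerA, if_neg h, ih, List.map_cons]
      rw [hk, List.take_succ_cons, List.length_append, List.length_cons, List.length_nil]
      simp

theorem pvOuterA_eq (limit : Int) :
    ∀ (as : List String) (acc : List String),
      pvOuterA limit acc as = acc ++ (pvFlat as).take ((limit - acc.length).toNat) := by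
  intro as
  induction as with
  | nil => intro acc; simp [pvOuterA, pvFlat]
  | cons a rest ih =>
    intro acc
    simp only [pvOuterA, pvInnerA_eq, pvFlat, List.flatMap_cons, List.take_append]
    set k : Nat := (limit - acc.length).toNat with hk
    have hblock : ((pvEndings.map (fun e => a ++ " " ++ e))).length = 24 := by
      simp [pvEndings]
    have hlen : ((pvEndings.map (fun e => a ++ " " ++ e)).take k).length = min k 24 := by
      simp [hblock]
    by_cases h : ((acc ++ (pvEndings.map (fun e => a ++ " " ++ e)).take k).length : Int) ≥ limit
    · rw [if_pos h]
      have h0 : k - ((pvEndings.map (fun e => a ++ " " ++ e))).length = 0 := by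
        simp only [List.length_append, hlen] at h
        push_cast at h
        omega
      rw [h0]
      simp
    · rw [if_neg h]
      rw [ih]
      have hk24 : 24 ≤ k := by
        simp only [List.length_append, hlen] at h
        push_cast at h
        omega
      have htake : (pvEndings.map (fun e => a ++ " " ++ e)).take k
          = pvEndings.map (fun e => a ++ " " ++ e) := List.take_of_length_le (by omega)
      rw [htake]
      have harith : (limit - ((acc ++ pvEndings.map (fun e => a ++ " " ++ e)).length : Int)).toNat
          = k - ((pvEndings.map (fun e => a ++ " " ++ e))).length := by
        simp only [List.length_append, hblock]
        push_cast
        omega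
      rw [harith]
      simp [pvFlat]

-- A computes the truncated product list
theorem portA_eq (as : List String) (limit : Int) :
    generate_full_postcodes_py as limit = (pvFlat as).take limit.toNat := by
  simpa using pvOuterA_eq limit as []

theorem pvFlat_getElem (as : List String) (i : Nat) (h : i < as.length * 24) :
    (pvFlat as)[i]'(by rw [pvFlat_length]; exact h)
      = (as[i / 24]'(by omega)) ++ " " ++
        (pvEndings[i % 24]'(by have : pvEndings.length = 24 := rfl; omega)) := by
  induction as generalizing i with
  | nil => simp at h
  | cons a rest ih =>
    have hlen : (pvEndings.map (fun e => a ++ " " ++ e)).length = 24 := by simp [pvEndings]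
    by_cases hi : i < 24
    · have h0 : i / 24 = 0 := by omega
      have h1 : i % 24 = i := by omega
      simp only [pvFlat, List.flatMap_cons]
      rw [List.getElem_append_left (by omega)]
      simp [h0, h1]
    · have h24 : 24 ≤ i := by omega
      simp only [pvFlat, List.flatMap_cons]
      rw [List.getElem_append_right (by omega)]
      have hrest : i - (pvEndings.map (fun e => a ++ " " ++ e)).length < rest.length * 24 := by
        simp only [List.length_cons] at h
        omega
      have := ih (i - 24) (by simp only [List.length_cons] at h; omega)
      simp only [pvFlat] at this
      simp only [hlen]
      rw [this]
      have hdiv : i / 24 = (i - 24) / 24 + 1 := by omega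
      have hmod : i % 24 = (i - 24) % 24 := by omega
      simp only [hdiv, hmod, List.getElem_cons_succ]

-- B computes the same truncated product list
theorem portB_eq (as : List String) (limit : Int) :
    generate_full_postcodes_py_alt as limit = (pvFlat as).take limit.toNat := by
  unfold generate_full_postcodes_py_alt
  rw [show ((pvEndings.length : Int)) = 24 from by simp [pvEndings]]
  set t : Int := min limit ((as.length : Int) * 24) with ht
  have htub : t.toNat ≤ as.length * 24 := by omega
  have htake : (pvFlat as).take limit.toNat = (pvFlat as).take t.toNat := by
    by_cases hc : limit ≤ (as.length : Int) * 24
    · rw [show t = limit from by omega]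
    · rw [show t.toNat = as.length * 24 from by omega,
        List.take_of_length_le (by rw [pvFlat_length]; omega),
        List.take_of_length_le (by rw [pvFlat_length])]
  rw [htake]
  apply List.ext_getElem
  · rw [List.length_map, PySem.List.length_pyRange_one, List.length_take, pvFlat_length]
    omega
  · intro i h1 h2
    have hi : i < t.toNat := by
      rw [List.length_map, PySem.List.length_pyRange_one] at h1
      omega
    rw [List.getElem_map, PySem.List.getElem_pyRange_one]
    rw [show (0 : Int) + (i : Int) = ((i : Nat) : Int) from by omega]
    have hdiv : PySem.Int.floordiv ((i : Nat) : Int) 24 = ((i / 24 : Nat) : Int) := by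
      exact_mod_cast PySem.Int.floordiv_natCast i 24
    have hmod : PySem.Int.mod ((i : Nat) : Int) 24 = ((i % 24 : Nat) : Int) := by
      exact_mod_cast PySem.Int.mod_natCast i 24
    have hilt : i < as.length * 24 := by omega
    have h24 : pvEndings.length = 24 := rfl
    rw [hdiv, hmod, PySem.List.pyGetD_natCast, PySem.List.pyGetD_natCast,
      List.getElem_take, pvFlat_getElem as i hilt,
      List.getD_eq_getElem _ _ (by omega), List.getD_eq_getElem _ _ (by omega)]

-- ===== VERDICT (by name: the statement is the Claim_ definition above) =====
theorem generate_full_postcodes_py_spec : Claim_equal_generate_full_postcodes_py := by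
  intro as limit _
  unfold Spec_generate_full_postcodes_py
  rw [portA_eq, portB_eq]
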